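-- pv_equiv track=rewrite | github.com/hemalathaa90/Tents-and-Trees-Project | input_to_rules.py | generate_asp
-- ===== SOURCE A (Python) =====
-- def generate_asp(rows, cols, puzzle, row_counts):
--     asp_code = f"rows({rows}).\ncolumns({cols}).\n"
--
--     # Generate tree and tent predicates
--     for i, row in enumerate(puzzle, start=1):
--         for j, cell in enumerate(row[0], start=1):
--             if cell == 'T':
--                 asp_code += f"tree({i}, {j}).\n"
--             elif cell.isdigit():
--                 count = int(cell)
--                 for k in range(count):
--                     asp_code += f"tent({i}, {j+k}).\n"
--
--     # Generate rowsum predicates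
--     for i, count in enumerate(row_counts, start=1):
--         asp_code += f"rowsum({i}, {count}).\n"
--
--     # Generate colsum predicates
--     for j in range(1, cols + 1):
--         col_counts = sum(1 for row in puzzle if row[0][j-1] == 'T')
--         asp_code += f"colsum({j}, {col_counts}).\n"
--
--     # Generate free predicates
--     for i, row in enumerate(puzzle, start=1):
--         for j, cell in enumerate(row[0], start=1):
--             if cell == '.':
--                 asp_code += f"free({i}, {j}).\n"
--
--     return asp_code
-- ===== SOURCE B (Python) =====
-- def generate_asp(rows, cols, puzzle, row_counts):
--     parts = [f"rows({rows}).\ncolumns({cols}).\n"]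
--     col_counts = [0] * cols
--
--     # One traversal: emit tree/tent predicates and tally column 'T' counts as we go
--     for i, row in enumerate(puzzle, start=1):
--         for j, cell in enumerate(row[0], start=1):
--             if cell == 'T':
--                 parts.append(f"tree({i}, {j}).\n")
--                 if j <= cols:
--                     col_counts[j - 1] += 1
--             elif cell.isdigit():
--                 for k in range(int(cell)):
--                     parts.append(f"tent({i}, {j + k}).\n")
--
--     for i, count in enumerate(row_counts, start=1):
--         parts.append(f"rowsum({i}, {count}).\n")
--
--     # Column sums come straight from the prebuilt table, no per-column rescan
--     for j, c in enumerate(col_counts, start=1):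
--         parts.append(f"colsum({j}, {c}).\n")
--
--     for i, row in enumerate(puzzle, start=1):
--         for j, cell in enumerate(row[0], start=1):
--             if cell == '.':
--                 parts.append(f"free({i}, {j}).\n")
--
--     return ''.join(parts)
-- ===== Notes on version B (the rewrite author's own statement) =====
-- stated objective: alternative
-- what changed: Column sums are tallied incrementally in a col_counts table during the single tree/tent traversal instead of re-scanning every row once per column, and the output is assembled with a parts list and ''.join instead of repeated string +=.
import Mathlib
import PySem

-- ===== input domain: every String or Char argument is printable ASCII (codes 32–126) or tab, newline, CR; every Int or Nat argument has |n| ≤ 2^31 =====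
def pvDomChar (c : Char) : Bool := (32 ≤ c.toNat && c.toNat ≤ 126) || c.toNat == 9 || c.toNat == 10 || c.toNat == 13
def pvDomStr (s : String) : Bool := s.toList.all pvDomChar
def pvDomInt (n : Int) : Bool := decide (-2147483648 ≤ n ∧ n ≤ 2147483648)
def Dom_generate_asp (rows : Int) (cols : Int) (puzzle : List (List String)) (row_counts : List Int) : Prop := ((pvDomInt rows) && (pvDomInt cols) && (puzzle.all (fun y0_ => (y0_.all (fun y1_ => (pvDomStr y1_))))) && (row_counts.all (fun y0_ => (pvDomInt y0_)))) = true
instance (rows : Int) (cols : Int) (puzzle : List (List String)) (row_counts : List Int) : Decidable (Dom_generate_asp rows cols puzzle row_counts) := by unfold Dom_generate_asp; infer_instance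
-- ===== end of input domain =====

-- B tallies column sums in one pass over the grid and joins a parts list, instead of A's
-- per-column rescans of every row and repeated string concatenation (objective: alternative).


-- ===== PORT A =====
-- Line formatters: these are the f-strings, which are literally identical in Source A and Source B.
def pvHeader (rows cols : Int) : List Char :=
  "rows(".toList ++ PySem.Int.toChars rows ++ ").\ncolumns(".toList ++ PySem.Int.toChars cols ++ ").\n".toList
def pvTree (i j : Int) : List Char :=
  "tree(".toList ++ PySem.Int.toChars i ++ ", ".toList ++ PySem.Int.toChars j ++ ").\n".toList
def pvTent (i j : Int) : List Char :=
  "tent(".toList ++ PySem.Int.toChars i ++ ", ".toList ++ PySem.Int.toChars j ++ ").\n".toList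
def pvRowsumL (i c : Int) : List Char :=
  "rowsum(".toList ++ PySem.Int.toChars i ++ ", ".toList ++ PySem.Int.toChars c ++ ").\n".toList
def pvColsumL (j c : Int) : List Char :=
  "colsum(".toList ++ PySem.Int.toChars j ++ ", ".toList ++ PySem.Int.toChars c ++ ").\n".toList
def pvFreeL (i j : Int) : List Char :=
  "free(".toList ++ PySem.Int.toChars i ++ ", ".toList ++ PySem.Int.toChars j ++ ").\n".toList

-- row[0]: `none` would be Python's IndexError on an empty row; excluded by Pre_.
def pvRow0 (row : List String) : List Char := ((PySem.List.pyGet? row 0).getD "").toList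

-- inner loop of A's first pass: `for j, cell in enumerate(row[0], start=1)`
-- `cell.isdigit()` on one printable-ASCII char is Char.isDigit; `int(cell)` is its value - 48 (exact on ASCII digits).
def aCells (i j : Int) (cs : List Char) (acc : List Char) : List Char :=
  match cs with
  | [] => acc
  | c :: rest =>
    aCells i (j + 1) rest
      (if c = 'T' then acc ++ pvTree i j
       else if c.isDigit then
         (PySem.List.pyRange 0 ((c.toNat : Int) - 48) 1).foldl (fun a k => a ++ pvTent i (j + k)) acc
       else acc)

def aGrid (i : Int) (rs : List (List String)) (acc : List Char) : List Char :=
  match rs with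
  | [] => acc
  | row :: rest => aGrid (i + 1) rest (aCells i 1 (pvRow0 row) acc)

def aRowsums (i : Int) (cs : List Int) (acc : List Char) : List Char :=
  match cs with
  | [] => acc
  | c :: rest => aRowsums (i + 1) rest (acc ++ pvRowsumL i c)

-- `sum(1 for row in puzzle if row[0][j-1] == 'T')`; pyGet? = none is Python's IndexError, excluded by Pre_.
def aColCount (puzzle : List (List String)) (j : Int) : Int :=
  puzzle.foldl (fun n row => if PySem.List.pyGet? (pvRow0 row) (j - 1) = some 'T' then n + 1 else n) 0

def aFreeCells (i j : Int) (cs : List Char) (acc : List Char) : List Char :=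
  match cs with
  | [] => acc
  | c :: rest => aFreeCells i (j + 1) rest (if c = '.' then acc ++ pvFreeL i j else acc)

def aFreeGrid (i : Int) (rs : List (List String)) (acc : List Char) : List Char :=
  match rs with
  | [] => acc
  | row :: rest => aFreeGrid (i + 1) rest (aFreeCells i 1 (pvRow0 row) acc)

def generate_asp (rows : Int) (cols : Int) (puzzle : List (List String)) (row_counts : List Int) : String :=
  let s1 := aGrid 1 puzzle (pvHeader rows cols)
  let s2 := aRowsums 1 row_counts s1
  let s3 := (PySem.List.pyRange 1 (cols + 1) 1).foldl (fun a j => a ++ pvColsumL j (aColCount puzzle j)) s2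
  String.ofList (aFreeGrid 1 puzzle s3)

-- ===== PORT B =====
-- inner loop of B's single pass: emits tree/tent parts AND bumps col_counts[j-1] for 'T' cells with j <= cols
def bCells (cols i j : Int) (cs : List Char) (ps : List (List Char)) (cc : List Int) :
    List (List Char) × List Int :=
  match cs with
  | [] => (ps, cc)
  | c :: rest =>
    if c = 'T' then
      bCells cols i (j + 1) rest (ps ++ [pvTree i j])
        (if j ≤ cols then cc.modify (j - 1).toNat (· + 1) else cc)
    else if c.isDigit then
      bCells cols i (j + 1) rest
        ((PySem.List.pyRange 0 ((c.toNat : Int) - 48) 1).foldl (fun p k => p ++ [pvTent i (j + k)]) ps) cc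
    else bCells cols i (j + 1) rest ps cc

def bGrid (cols i : Int) (rs : List (List String)) (ps : List (List Char)) (cc : List Int) :
    List (List Char) × List Int :=
  match rs with
  | [] => (ps, cc)
  | row :: rest =>
    let pc := bCells cols i 1 (pvRow0 row) ps cc
    bGrid cols (i + 1) rest pc.1 pc.2

def bRowsums (i : Int) (cs : List Int) (ps : List (List Char)) : List (List Char) :=
  match cs with
  | [] => ps
  | c :: rest => bRowsums (i + 1) rest (ps ++ [pvRowsumL i c])

-- `for j, c in enumerate(col_counts, start=1)`
def bColsums (j : Int) (cc : List Int) (ps : List (List Char)) : List (List Char) :=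
  match cc with
  | [] => ps
  | c :: rest => bColsums (j + 1) rest (ps ++ [pvColsumL j c])

def bFreeCells (i j : Int) (cs : List Char) (ps : List (List Char)) : List (List Char) :=
  match cs with
  | [] => ps
  | c :: rest => bFreeCells i (j + 1) rest (if c = '.' then ps ++ [pvFreeL i j] else ps)

def bFreeGrid (i : Int) (rs : List (List String)) (ps : List (List Char)) : List (List Char) :=
  match rs with
  | [] => ps
  | row :: rest => bFreeGrid (i + 1) rest (bFreeCells i 1 (pvRow0 row) ps)

def generate_asp_alt (rows : Int) (cols : Int) (puzzle : List (List String)) (row_counts : List Int) : String :=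
  -- col_counts = [0] * cols  (empty for cols <= 0, as in Python)
  let pc := bGrid cols 1 puzzle [pvHeader rows cols] (List.replicate cols.toNat 0)
  let ps := bRowsums 1 row_counts pc.1
  let ps := bColsums 1 pc.2 ps
  let ps := bFreeGrid 1 puzzle ps
  String.ofList ps.flatten        -- ''.join(parts)

-- ===== PRECONDITION & SPEC =====
-- Exactly where Python A returns: every row nonempty (row[0]) and, reading row[0][j-1] for j = 1..cols
-- in the colsum rescan, every first string at least cols long (vacuous for cols <= 0).
def Pre_generate_asp (rows : Int) (cols : Int) (puzzle : List (List String)) (row_counts : List Int) : Prop :=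
  ∀ row ∈ puzzle, row ≠ [] ∧ cols ≤ PySem.Str.len (row.headD "")
instance (rows : Int) (cols : Int) (puzzle : List (List String)) (row_counts : List Int) : Decidable (Pre_generate_asp rows cols puzzle row_counts) := by unfold Pre_generate_asp; infer_instance

def pvWitness_generate_asp : Int × Int × List (List String) × List Int := (2, 2, [["T."], ["1T"]], [1, 0])

def Spec_generate_asp (rows : Int) (cols : Int) (puzzle : List (List String)) (row_counts : List Int) (out : String) : Prop := out = generate_asp_alt rows cols puzzle row_counts
instance (rows : Int) (cols : Int) (puzzle : List (List String)) (row_counts : List Int) (out : String) : Decidable (Spec_generate_asp rows cols puzzle row_counts out) := by unfold Spec_generate_asp; infer_instance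

-- ===== CLAIM (what is proved, stated in full; the proofs are below) =====
def Claim_equal_generate_asp : Prop := ∀ (rows : Int) (cols : Int) (puzzle : List (List String)) (row_counts : List Int), Dom_generate_asp rows cols puzzle row_counts → Pre_generate_asp rows cols puzzle row_counts → Spec_generate_asp rows cols puzzle row_counts (generate_asp rows cols puzzle row_counts)

-- ===== LEMMAS AND PROOFS =====

-- Spec-level descriptions of the emitted parts (used only by the proofs).
def emitParts (i j : Int) (c : Char) : List (List Char) :=
  if c = 'T' then [pvTree i j]
  else if c.isDigit then (PySem.List.pyRange 0 ((c.toNat : Int) - 48) 1).map (fun k => pvTent i (j + k))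
  else []

def cellsParts (i j : Int) : List Char → List (List Char)
  | [] => []
  | c :: rest => emitParts i j c ++ cellsParts i (j + 1) rest

def gridParts (i : Int) : List (List String) → List (List Char)
  | [] => []
  | row :: rest => cellsParts i 1 (pvRow0 row) ++ gridParts (i + 1) rest

def rsParts (i : Int) : List Int → List (List Char)
  | [] => []
  | c :: rest => pvRowsumL i c :: rsParts (i + 1) rest

def freeCellsParts (i j : Int) : List Char → List (List Char)
  | [] => []
  | c :: rest => (if c = '.' then [pvFreeL i j] else []) ++ freeCellsParts i (j + 1) rest

def freeGridParts (i : Int) : List (List String) → List (List Char)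
  | [] => []
  | row :: rest => freeCellsParts i 1 (pvRow0 row) ++ freeGridParts (i + 1) rest

-- per-column 'T' count over the rows (only columns below cols are tallied by B)
def colCnt (cols : Int) (p : Nat) : List (List String) → Int
  | [] => 0
  | row :: rest => (if (p : Int) < cols ∧ (pvRow0 row)[p]? = some 'T' then 1 else 0) + colCnt cols p rest

-- ===== A-side: accumulator-out lemmas =====
lemma aCells_eq (cs : List Char) : ∀ (i j : Int) (acc : List Char),
    aCells i j cs acc = acc ++ (cellsParts i j cs).flatten := by
  induction cs with
  | nil => intro i j acc; simp [aCells, cellsParts]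
  | cons c rest ih =>
    intro i j acc
    by_cases hT : c = 'T'
    · simp [aCells, cellsParts, emitParts, hT, ih]
    · by_cases hD : c.isDigit
      · simp [aCells, cellsParts, emitParts, hT, hD, ih]
      · simp [aCells, cellsParts, emitParts, hT, hD, ih]

lemma aGrid_eq (rs : List (List String)) : ∀ (i : Int) (acc : List Char),
    aGrid i rs acc = acc ++ (gridParts i rs).flatten := by
  induction rs with
  | nil => intro i acc; simp [aGrid, gridParts]
  | cons row rest ih => intro i acc; simp [aGrid, gridParts, ih, aCells_eq]

lemma aRowsums_eq (cs : List Int) : ∀ (i : Int) (acc : List Char),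
    aRowsums i cs acc = acc ++ (rsParts i cs).flatten := by
  induction cs with
  | nil => intro i acc; simp [aRowsums, rsParts]
  | cons c rest ih => intro i acc; simp [aRowsums, rsParts, ih]

lemma aFreeCells_eq (cs : List Char) : ∀ (i j : Int) (acc : List Char),
    aFreeCells i j cs acc = acc ++ (freeCellsParts i j cs).flatten := by
  induction cs with
  | nil => intro i j acc; simp [aFreeCells, freeCellsParts]
  | cons c rest ih =>
    intro i j acc
    by_cases h : c = '.'
    · simp [aFreeCells, freeCellsParts, h, ih]
    · simp [aFreeCells, freeCellsParts, h, ih]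

lemma aFreeGrid_eq (rs : List (List String)) : ∀ (i : Int) (acc : List Char),
    aFreeGrid i rs acc = acc ++ (freeGridParts i rs).flatten := by
  induction rs with
  | nil => intro i acc; simp [aFreeGrid, freeGridParts]
  | cons row rest ih => intro i acc; simp [aFreeGrid, freeGridParts, ih, aFreeCells_eq]

lemma pvFlattenMapSingleton {α : Type} (f : α → List Char) (l : List α) :
    (List.map (fun x => [f x]) l).flatten = List.map f l := by
  rw [← List.flatMap_def]; exact List.map_eq_flatMap.symm

lemma aColCount_aux (cols : Int) (p : Nat) (hp : (p : Int) < cols) (pz : List (List String)) :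
    ∀ (n : Int),
    pz.foldl (fun n row => if PySem.List.pyGet? (pvRow0 row) ((p : Nat) : Int) = some 'T' then n + 1 else n) n
      = n + colCnt cols p pz := by
  induction pz with
  | nil => intro n; simp [colCnt]
  | cons row rest ih =>
    intro n
    simp only [List.foldl_cons, colCnt]
    rw [PySem.List.pyGet?_natCast (pvRow0 row) p]
    by_cases h : (pvRow0 row)[p]? = some 'T'
    · rw [if_pos h, if_pos ⟨hp, h⟩, ih]; ring
    · rw [if_neg h, if_neg (by tauto), ih]; ring

lemma aColCount_eq (cols : Int) (puzzle : List (List String)) (p : Nat) (hp : (p : Int) < cols) :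
    aColCount puzzle (1 + p) = colCnt cols p puzzle := by
  unfold aColCount
  rw [show (1 : Int) + (p : Int) - 1 = ((p : Nat) : Int) from by omega]
  rw [aColCount_aux cols p hp puzzle 0, zero_add]

-- ===== B-side: parts-out lemmas =====
lemma bCells_fst (cols i : Int) (cs : List Char) : ∀ (j : Int) (ps : List (List Char)) (cc : List Int),
    (bCells cols i j cs ps cc).1 = ps ++ cellsParts i j cs := by
  induction cs with
  | nil => intro j ps cc; simp [bCells, cellsParts]
  | cons c rest ih =>
    intro j ps cc
    by_cases hT : c = 'T'
    · simp [bCells, cellsParts, emitParts, hT, ih]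
    · by_cases hD : c.isDigit
      · simp [bCells, cellsParts, emitParts, hT, hD, ih, pvFlattenMapSingleton]
      · simp [bCells, cellsParts, emitParts, hT, hD, ih]

lemma bCells_len (cols i : Int) (cs : List Char) : ∀ (j : Int) (ps : List (List Char)) (cc : List Int),
    ((bCells cols i j cs ps cc).2).length = cc.length := by
  induction cs with
  | nil => intro j ps cc; simp [bCells]
  | cons c rest ih =>
    intro j ps cc
    by_cases hT : c = 'T'
    · by_cases hj : j ≤ cols <;> simp [bCells, hT, hj, ih]
    · by_cases hD : c.isDigit <;> simp [bCells, hT, hD, ih]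

lemma getD_modify_add_one (cc : List Int) (n p : Nat) :
    (cc.modify n (· + 1)).getD p 0 = cc.getD p 0 + (if p = n ∧ n < cc.length then 1 else 0) := by
  by_cases hp : p < cc.length
  · rw [List.getD_eq_getElem cc 0 hp, List.getD_eq_getElem _ 0 (by simpa using hp),
      List.getElem_modify]
    by_cases h : p = n
    · subst h; simp [hp]
    · simp [h, Ne.symm h]
  · have hp' : (cc.modify n (· + 1)).length ≤ p := by rw [List.length_modify]; omega
    rw [List.getD_eq_default _ _ hp', List.getD_eq_default _ _ (Nat.le_of_not_lt hp)]
    simp; omega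

-- the key invariant: how one row's pass updates the col_counts table, entry by entry
lemma bCells_cc (cols i : Int) (cs : List Char) :
    ∀ (off : Nat) (ps : List (List Char)) (cc : List Int) (p : Nat),
    ((bCells cols i (1 + (off : Int)) cs ps cc).2).getD p 0 =
      cc.getD p 0 +
        (if off ≤ p ∧ p < cc.length ∧ (p : Int) < cols ∧ cs[p - off]? = some 'T' then 1 else 0) := by
  induction cs with
  | nil => intro off ps cc p; simp [bCells]
  | cons c rest ih =>
    intro off ps cc p
    have hstep : (1 : Int) + (off : Int) + 1 = 1 + ((off + 1 : Nat) : Int) := by push_cast; ring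
    by_cases hT : c = 'T'
    · subst hT
      by_cases hj : (1 : Int) + (off : Int) ≤ cols
      · have hnat : ((1 : Int) + (off : Int) - 1).toNat = off := by omega
        simp only [bCells, reduceIte, if_pos hj, hnat, hstep]
        rw [ih, List.length_modify, getD_modify_add_one]
        by_cases hpo : p = off
        · subst hpo
          have h1 : ¬ (p + 1 ≤ p) := by omega
          simp only [h1, false_and, if_false, add_zero]
          by_cases hlen : p < cc.length
          · have hc : (p : Int) < cols := by omega
            simp [hlen, hc]
          · simp [hlen]
        · rw [if_neg (by tauto), add_zero]
          congr 1
          by_cases hle : off + 1 ≤ p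
          · rw [show p - off = (p - (off + 1)) + 1 from by omega, List.getElem?_cons_succ]
            simp [hle, Nat.le_of_succ_le hle]
          · have h2 : ¬ (off ≤ p) := by omega
            simp [hle, h2]
      · simp only [bCells, reduceIte, if_neg hj, hstep]
        rw [ih]
        congr 1
        by_cases hle : off + 1 ≤ p
        · rw [show p - off = (p - (off + 1)) + 1 from by omega, List.getElem?_cons_succ]
          simp [hle, Nat.le_of_succ_le hle]
        · by_cases hpo : p = off
          · subst hpo
            have h2 : ¬ ((p : Int) < cols) := by omega
            simp [h2]
          · have h2 : ¬ (off ≤ p) := by omega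
            simp [hle, h2]
    · have step : ∀ cc' : List Int, ((bCells cols i (1 + ((off + 1 : Nat) : Int)) rest ps cc').2).getD p 0 =
          cc'.getD p 0 + (if off + 1 ≤ p ∧ p < cc'.length ∧ (p : Int) < cols ∧ rest[p - (off + 1)]? = some 'T' then 1 else 0) := by
        intro cc'
        exact ih (off + 1) ps cc' p
      have hcond : ∀ L : Nat, (if off ≤ p ∧ p < L ∧ (p : Int) < cols ∧ (c :: rest)[p - off]? = some 'T' then (1 : Int) else 0)
          = (if off + 1 ≤ p ∧ p < L ∧ (p : Int) < cols ∧ rest[p - (off + 1)]? = some 'T' then 1 else 0) := by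
        intro L
        by_cases hle : off + 1 ≤ p
        · rw [show p - off = (p - (off + 1)) + 1 from by omega, List.getElem?_cons_succ]
          simp [hle, Nat.le_of_succ_le hle]
        · by_cases hpo : p = off
          · subst hpo
            have hg : (c :: rest)[p - p]? = some c := by simp
            have : ¬ ((c :: rest)[p - p]? = some 'T') := by rw [hg]; simpa using hT
            simp only [hle, false_and, if_false]
            rw [if_neg (by tauto)]
          · have h2 : ¬ (off ≤ p) := by omega
            simp [hle, h2]
      by_cases hD : c.isDigit
      · simp only [bCells, if_neg hT, if_pos hD, hstep]
        rw [ih, hcond]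
      · simp only [bCells, if_neg hT, if_neg hD, hstep]
        rw [ih, hcond]

lemma bGrid_fst (cols : Int) (rs : List (List String)) : ∀ (i : Int) (ps : List (List Char)) (cc : List Int),
    (bGrid cols i rs ps cc).1 = ps ++ gridParts i rs := by
  induction rs with
  | nil => intro i ps cc; simp [bGrid, gridParts]
  | cons row rest ih => intro i ps cc; simp [bGrid, gridParts, ih, bCells_fst]

lemma bGrid_len (cols : Int) (rs : List (List String)) : ∀ (i : Int) (ps : List (List Char)) (cc : List Int),
    ((bGrid cols i rs ps cc).2).length = cc.length := by
  induction rs with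
  | nil => intro i ps cc; simp [bGrid]
  | cons row rest ih => intro i ps cc; simp [bGrid, ih, bCells_len]

lemma bGrid_cc (cols : Int) (rs : List (List String)) : ∀ (i : Int) (ps : List (List Char)) (cc : List Int) (p : Nat),
    p < cc.length →
    ((bGrid cols i rs ps cc).2).getD p 0 = cc.getD p 0 + colCnt cols p rs := by
  induction rs with
  | nil => intro i ps cc p hp; simp [bGrid, colCnt]
  | cons row rest ih =>
    intro i ps cc p hp
    simp only [bGrid, colCnt]
    have h1 : (1 : Int) = 1 + ((0 : Nat) : Int) := by norm_num
    rw [ih _ _ _ p (by rw [bCells_len]; exact hp)]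
    rw [h1, bCells_cc]
    simp only [Nat.zero_le, true_and, Nat.sub_zero]
    by_cases h : p < cc.length ∧ (p : Int) < cols ∧ (pvRow0 row)[p]? = some 'T'
    · obtain ⟨a, b, c⟩ := h; simp [a, b, c]; ring
    · have hc : ¬ ((p : Int) < cols ∧ (pvRow0 row)[p]? = some 'T') := by tauto
      rw [if_neg (by tauto), if_neg hc]; ring

lemma bRowsums_eq (cs : List Int) : ∀ (i : Int) (ps : List (List Char)),
    bRowsums i cs ps = ps ++ rsParts i cs := by
  induction cs with
  | nil => intro i ps; simp [bRowsums, rsParts]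
  | cons c rest ih => intro i ps; simp [bRowsums, rsParts, ih]

lemma bFreeCells_eq (cs : List Char) : ∀ (i j : Int) (ps : List (List Char)),
    bFreeCells i j cs ps = ps ++ freeCellsParts i j cs := by
  induction cs with
  | nil => intro i j ps; simp [bFreeCells, freeCellsParts]
  | cons c rest ih =>
    intro i j ps
    by_cases h : c = '.' <;> simp [bFreeCells, freeCellsParts, h, ih]

lemma bFreeGrid_eq (rs : List (List String)) : ∀ (i : Int) (ps : List (List Char)),
    bFreeGrid i rs ps = ps ++ freeGridParts i rs := by
  induction rs with
  | nil => intro i ps; simp [bFreeGrid, freeGridParts]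
  | cons row rest ih => intro i ps; simp [bFreeGrid, freeGridParts, ih, bFreeCells_eq]

-- B's colsum emission from the finished table equals A's per-column map, given the table is correct
lemma bColsums_eq (cols : Int) (puzzle : List (List String)) :
    ∀ (cc : List Int) (t : Int) (ps : List (List Char)), 1 ≤ t → cc.length = (cols + 1 - t).toNat →
    (∀ r : Nat, r < cc.length → cc.getD r 0 = aColCount puzzle (t + r)) →
    bColsums t cc ps = ps ++ (PySem.List.pyRange t (cols + 1) 1).map (fun j => pvColsumL j (aColCount puzzle j)) := by
  intro cc
  induction cc with
  | nil =>
    intro t ps ht hlen _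
    have : cols + 1 ≤ t := by simp at hlen; omega
    have hr : PySem.List.pyRange t (cols + 1) 1 = [] := by
      simp [PySem.List.pyRange]; omega
    simp [bColsums, hr]
  | cons c rest ih =>
    intro t ps ht hlen hval
    have hlt : t < cols + 1 := by simp at hlen; omega
    rw [PySem.List.pyRange_one_cons hlt]
    have hc : c = aColCount puzzle t := by simpa using hval 0 (by simp)
    have hval' : ∀ r, r < rest.length → rest.getD r 0 = aColCount puzzle ((t + 1) + r) := by
      intro r hr
      have h := hval (r + 1) (by simp; omega)
      simp only [List.getD_cons_succ] at h
      rw [h]; congr 1; push_cast; ring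
    simp only [bColsums, List.map_cons]
    rw [hc, ih (t + 1) (ps ++ [pvColsumL t (aColCount puzzle t)]) (by omega) (by simp at hlen ⊢; omega) hval']
    simp

-- ===== VERDICT (by name: the statement is the Claim_ definition above) =====
theorem generate_asp_spec : Claim_equal_generate_asp := by
  intro rows cols puzzle row_counts _hdom _hpre
  unfold Spec_generate_asp generate_asp generate_asp_alt
  dsimp only
  rw [aGrid_eq, aRowsums_eq, PySem.List.foldl_append_eq_flatMap, aFreeGrid_eq]
  rw [bGrid_fst, bRowsums_eq]
  rw [bColsums_eq cols puzzle _ 1 _ (le_refl 1)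
      (by rw [bGrid_len]; simp)
      (by
        intro r hr
        rw [bGrid_len] at hr
        simp at hr
        have hrc : (r : Int) < cols := by omega
        rw [bGrid_cc cols puzzle 1 _ _ r (by simp; omega)]
        rw [aColCount_eq cols puzzle r hrc]
        simp)]
  rw [bFreeGrid_eq]
  simp [List.flatMap_def, List.flatten_append, List.append_assoc]
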